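-- pv_equiv track=rewrite | github.com/ttys001/MHC-ICC-Profile-Maker | mhc_icc_gui.py | compute_mluc_layout
-- ===== SOURCE A (Python) =====
-- def compute_mluc_layout(records):
--     header = 16
--     table_size = len(records) * 12
--     offset = header + table_size
--     layout = []
--     for rec in records:
--         text_bytes = rec["text"].encode("utf-16be")
--         length = len(text_bytes)
--         layout.append({"length": length, "offset": offset})
--         offset += length
--         pad = (4 - (offset % 4)) % 4
--         offset += pad
--     return layout
-- ===== SOURCE B (Python) =====
-- def compute_mluc_layout(records):
--     # Recursive formulation in 4-byte units: a record occupies ceil(len/2)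
--     # quads (UTF-16BE of the ASCII/BMP text is 2*len(text) bytes, padded to a
--     # multiple of 4), so offsets stay multiples of 4 and no byte-level running
--     # offset, encoding, or modulo arithmetic is needed.
--     def go(recs, q):
--         if not recs:
--             return []
--         t = len(recs[0]["text"])
--         return [{"length": 2 * t, "offset": 4 * q}] + go(recs[1:], q + (t + 1) // 2)
--     return go(records, 4 + 3 * len(records))
-- ===== Notes on version B (the rewrite author's own statement) =====
-- stated objective: alternative
-- what changed: Replaces A's iterative encode-and-accumulate byte loop (running byte offset, pad recomputed with two mod operations per record) by a structural recursion that never encodes and never takes a modulus: it counts characters and tracks the offset in 4-byte quad units, each record advancing it by ceil(len/2) quads, exploiting that a padded UTF-16BE ASCII text occupies exactly 4*ceil(len/2) bytes.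
import Mathlib
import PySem

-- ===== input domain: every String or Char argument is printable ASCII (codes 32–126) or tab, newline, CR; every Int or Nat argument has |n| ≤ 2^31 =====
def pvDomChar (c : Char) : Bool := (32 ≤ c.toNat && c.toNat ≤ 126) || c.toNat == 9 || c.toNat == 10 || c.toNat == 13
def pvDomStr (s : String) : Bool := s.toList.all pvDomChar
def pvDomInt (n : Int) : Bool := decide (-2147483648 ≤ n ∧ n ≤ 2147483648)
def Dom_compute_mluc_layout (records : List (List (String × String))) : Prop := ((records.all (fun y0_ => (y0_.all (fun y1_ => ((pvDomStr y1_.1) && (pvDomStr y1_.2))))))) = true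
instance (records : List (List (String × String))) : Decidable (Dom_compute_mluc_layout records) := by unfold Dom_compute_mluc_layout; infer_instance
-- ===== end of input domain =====

-- B drops A's byte-level encode-and-accumulate loop for a recursion counting
-- characters and tracking the offset in 4-byte quad units (objective: alternative).

-- ===== PORT A =====
-- len(rec["text"].encode("utf-16be")): 2 bytes per character — exact on the ASCII
-- domain Dom_ (every char is a single BMP code unit).  Missing "text" key raises
-- KeyError in Python; Pre_ excludes that, the default "" below is never claimed.
def pvTextLen (rec : List (String × String)) : Int :=
  2 * (((List.lookup "text" rec).getD "").toList.length : Int)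

def compute_mluc_layout (records : List (List (String × String))) : List (List (String × Int)) :=
  let header : Int := 16
  let table_size : Int := (records.length : Int) * 12
  let st := records.foldl (fun (st : Int × List (List (String × Int))) rec =>
    let length := pvTextLen rec
    let layout := st.2 ++ [[("length", length), ("offset", st.1)]]
    let offset := st.1 + length
    let pad := PySem.Int.mod (4 - PySem.Int.mod offset 4) 4
    (offset + pad, layout)) (header + table_size, [])
  st.2

-- ===== PORT B =====
-- recursive helper go(recs, q): q is the current offset in 4-byte units
def pvGoB (recs : List (List (String × String))) (q : Int) : List (List (String × Int)) :=
  match recs with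
  | [] => []
  | r :: rs =>
    let t : Int := (((List.lookup "text" r).getD "").toList.length : Int)
    [("length", 2 * t), ("offset", 4 * q)] :: pvGoB rs (q + PySem.Int.floordiv (t + 1) 2)

def compute_mluc_layout_alt (records : List (List (String × String))) : List (List (String × Int)) :=
  pvGoB records (4 + 3 * (records.length : Int))

-- ===== PRECONDITION & SPEC =====
-- Pre_ holds exactly when every record has a "text" key; otherwise Python A raises KeyError.
def Pre_compute_mluc_layout (records : List (List (String × String))) : Prop :=
  ∀ rec ∈ records, (List.lookup "text" rec).isSome
instance (records : List (List (String × String))) : Decidable (Pre_compute_mluc_layout records) := by unfold Pre_compute_mluc_layout; infer_instance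
def pvWitness_compute_mluc_layout : (List (List (String × String))) := [[("text", "Hi")], [("text", "abc")]]

def Spec_compute_mluc_layout (records : List (List (String × String))) (out : List (List (String × Int))) : Prop := out = compute_mluc_layout_alt records
instance (records : List (List (String × String))) (out : List (List (String × Int))) : Decidable (Spec_compute_mluc_layout records out) := by unfold Spec_compute_mluc_layout; infer_instance

-- ===== CLAIM (what is proved, stated in full; the proofs are below) =====
def Claim_equal_compute_mluc_layout : Prop := ∀ (records : List (List (String × String))), Dom_compute_mluc_layout records → Pre_compute_mluc_layout records → Spec_compute_mluc_layout records (compute_mluc_layout records)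

-- ===== LEMMAS AND PROOFS =====

-- A's layout as a structural recursion over records with running byte offset
def pvGoA (recs : List (List (String × String))) (o : Int) : List (List (String × Int)) :=
  match recs with
  | [] => []
  | r :: rs =>
    let l := pvTextLen r
    [("length", l), ("offset", o)] ::
      pvGoA rs (o + l + PySem.Int.mod (4 - PySem.Int.mod (o + l) 4) 4)

-- A's fold appends exactly pvGoA
lemma foldA_eq (recs : List (List (String × String))) (o : Int) (acc : List (List (String × Int))) :
    (recs.foldl (fun (st : Int × List (List (String × Int))) rec =>
      let length := pvTextLen rec
      let layout := st.2 ++ [[("length", length), ("offset", st.1)]]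
      let offset := st.1 + length
      let pad := PySem.Int.mod (4 - PySem.Int.mod offset 4) 4
      (offset + pad, layout)) (o, acc)).2 = acc ++ pvGoA recs o := by
  induction recs generalizing o acc with
  | nil => simp [pvGoA]
  | cons r rs ih =>
    simp only [List.foldl_cons, pvGoA]
    rw [ih]
    simp

-- on 4-aligned offsets, A's recursion coincides with B's quad-unit recursion
lemma goA_eq_goB (recs : List (List (String × String))) (q : Int) :
    pvGoA recs (4 * q) = pvGoB recs q := by
  induction recs generalizing q with
  | nil => rfl
  | cons r rs ih =>
    simp only [pvGoA, pvGoB, pvTextLen]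
    set t : Int := (((List.lookup "text" r).getD "").toList.length : Int) with ht
    have h0 : (0:Int) ≤ t := by rw [ht]; positivity
    have harg : 4 * q + 2 * t + PySem.Int.mod (4 - PySem.Int.mod (4 * q + 2 * t) 4) 4
          = 4 * (q + PySem.Int.floordiv (t + 1) 2) := by
        rw [PySem.Int.floordiv_eq_ediv_of_pos (by norm_num),
            PySem.Int.mod_eq_emod_of_pos (by norm_num),
            PySem.Int.mod_eq_emod_of_pos (by norm_num)]
        omega
    rw [harg, ih]

-- ===== VERDICT (by name: the statement is the Claim_ definition above) =====
theorem compute_mluc_layout_spec : Claim_equal_compute_mluc_layout := by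
  intro records _ _
  show compute_mluc_layout records = compute_mluc_layout_alt records
  unfold compute_mluc_layout compute_mluc_layout_alt
  rw [foldA_eq records _ []]
  have : (16 : Int) + (records.length : Int) * 12 = 4 * (4 + 3 * (records.length : Int)) := by ring
  simp only [List.nil_append, this, goA_eq_goB]
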